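-- pv_equiv track=rewrite | github.com/doocs/leetcode | solution/3200-3299/3237.Alt and Tab Simulation/Solution.py | simulationResult
-- ===== SOURCE A (Python) =====
-- from typing import List
--
-- def simulationResult(windows: List[int], queries: List[int]) -> List[int]:
--     s = set()
--     ans = []
--     for q in queries[::-1]:
--         if q not in s:
--             ans.append(q)
--             s.add(q)
--     for w in windows:
--         if w not in s:
--             ans.append(w)
--     return ans
-- ===== SOURCE B (Python) =====
-- def simulationResult(windows, queries):
--     # Forward pass: a dict as an ordered set with move-to-end on re-access
--     # (keys end up ordered oldest .. most-recently-queried).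
--     od = {}
--     for q in queries:
--         od.pop(q, None)
--         od[q] = True
--     res = list(reversed(od))
--     return res + [w for w in windows if w not in od]
-- ===== Notes on version B (the rewrite author's own statement) =====
-- stated objective: idiomatic
-- what changed: B simulates the accesses forward with a move-to-end ordered dict and reverses its keys at the end, instead of A's backward scan over reversed queries with a seen-set.
import Mathlib
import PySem

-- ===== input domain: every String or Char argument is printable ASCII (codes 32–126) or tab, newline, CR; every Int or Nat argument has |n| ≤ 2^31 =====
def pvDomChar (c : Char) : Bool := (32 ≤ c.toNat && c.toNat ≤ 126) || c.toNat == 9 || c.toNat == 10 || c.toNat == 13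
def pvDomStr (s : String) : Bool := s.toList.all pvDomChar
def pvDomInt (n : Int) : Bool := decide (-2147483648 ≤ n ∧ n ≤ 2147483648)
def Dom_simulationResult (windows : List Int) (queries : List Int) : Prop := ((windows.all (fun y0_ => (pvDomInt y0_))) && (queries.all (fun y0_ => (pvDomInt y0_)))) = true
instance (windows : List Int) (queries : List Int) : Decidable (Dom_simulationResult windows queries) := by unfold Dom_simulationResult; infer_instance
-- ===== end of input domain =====

-- B replaces A's backward scan (reversed queries + seen-set) by a forward move-to-end
-- ordered dict whose keys are reversed at the end; return values are equal, similar cost.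

-- ===== PORT A =====
def simulationResult (windows : List Int) (queries : List Int) : List Int :=
  let rev := (PySem.List.slice? queries none none (-1)).getD []  -- queries[::-1]
  let p := rev.foldl (fun (p : PySem.Set Int × List Int) q =>
      if PySem.Set.contains p.1 q then p else (PySem.Set.add p.1 q, p.2 ++ [q]))
    (PySem.Set.empty, [])
  windows.foldl (fun ans w => if PySem.Set.contains p.1 w then ans else ans ++ [w]) p.2

-- ===== PORT B =====
def simulationResult_alt (windows : List Int) (queries : List Int) : List Int :=
  -- od.pop(q, None) discards the value, so it is Dict.erase
  let od := queries.foldl (fun d q => (d.erase q).insert q true)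
    (PySem.Dict.empty : PySem.Dict Int Bool)
  let res := od.keys.reverse              -- list(reversed(od))
  res ++ windows.filter (fun w => !(od.contains w))

-- ===== PRECONDITION & SPEC =====
def Spec_simulationResult (windows : List Int) (queries : List Int) (out : List Int) : Prop := out = simulationResult_alt windows queries
instance (windows : List Int) (queries : List Int) (out : List Int) : Decidable (Spec_simulationResult windows queries out) := by unfold Spec_simulationResult; infer_instance

-- ===== CLAIM (what is proved, stated in full; the proofs are below) =====
def Claim_equal_simulationResult : Prop := ∀ (windows : List Int) (queries : List Int), Dom_simulationResult windows queries → Spec_simulationResult windows queries (simulationResult windows queries)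

-- ===== LEMMAS AND PROOFS =====

-- A's dedup loop: from the empty state, the seen-set and the answer both end up as set(l) in first-occurrence order.
theorem aLoop_eq (l : List Int) :
    l.foldl (fun (p : PySem.Set Int × List Int) q =>
        if PySem.Set.contains p.1 q then p else (PySem.Set.add p.1 q, p.2 ++ [q]))
      (PySem.Set.empty, [])
    = (PySem.Set.ofList l, PySem.Set.ofList l) := by
  induction l using List.reverseRecOn with
  | nil => rfl
  | append_singleton xs q ih =>
      rw [List.foldl_append, ih, PySem.Set.ofList_append_singleton]
      by_cases h : q ∈ PySem.Set.ofList xs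
      · simp [h]
      · simp [h, PySem.Set.add_eq_ite]

-- one move-to-end step of B's dict, seen on the key list: drop q wherever it was and append it
theorem keys_step (d : PySem.Dict Int Bool) (q : Int) :
    ((d.erase q).insert q true).keys = d.keys.filter (fun x => x != q) ++ [q] := by
  have hnc : (d.erase q).contains q = false := by
    simp [PySem.Dict.erase, PySem.Dict.contains, List.any_filter]
  rw [PySem.Dict.keys_insert_of_not_contains _ _ hnc]
  simp [PySem.Dict.erase, PySem.Dict.keys, List.filter_map, Function.comp_def, bne]

-- B's dict loop, projected to its key list
theorem dictLoop_keys (l : List Int) (d : PySem.Dict Int Bool) :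
    (l.foldl (fun d q => (d.erase q).insert q true) d).keys
    = l.foldl (fun ks q => ks.filter (fun x => x != q) ++ [q]) d.keys := by
  induction l generalizing d with
  | nil => rfl
  | cons q l ih => rw [List.foldl_cons, List.foldl_cons, ih, keys_step]

-- the move-to-end key list is the reverse of set(reversed(l))
theorem kLoop_eq (l : List Int) :
    l.foldl (fun ks q => ks.filter (fun x => x != q) ++ [q]) ([] : List Int)
    = (PySem.Set.ofList l.reverse).reverse := by
  induction l using List.reverseRecOn with
  | nil => rfl
  | append_singleton xs q ih =>
      rw [List.foldl_append, List.foldl_cons, List.foldl_nil, ih]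
      rw [show (xs ++ [q]).reverse = q :: xs.reverse by simp]
      rw [PySem.Set.ofList_cons, List.reverse_cons]
      congr 1
      simp [PySem.Set.discard, bne, List.filter_reverse]

theorem simulationResult_eq (windows queries : List Int) :
    simulationResult windows queries = simulationResult_alt windows queries := by
  unfold simulationResult simulationResult_alt
  rw [PySem.List.slice?_none_none_neg_one]
  simp only [Option.getD_some, aLoop_eq, dictLoop_keys, PySem.Dict.keys_empty, kLoop_eq,
    List.reverse_reverse]
  have hfilter : windows.foldl
      (fun ans w => if PySem.Set.contains (PySem.Set.ofList queries.reverse) w then ans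
        else ans ++ [w]) (PySem.Set.ofList queries.reverse)
      = PySem.Set.ofList queries.reverse
        ++ windows.filter (fun w => !(PySem.Set.ofList queries.reverse).contains w) := by
    induction windows using List.reverseRecOn with
    | nil => simp
    | append_singleton ws w ih =>
        rw [List.foldl_append, List.foldl_cons, List.foldl_nil, ih, List.filter_append]
        by_cases h : w ∈ queries
        · simp [h]
        · simp [h]
  rw [hfilter]
  congr 1
  apply List.filter_congr
  intro w _
  have : (queries.foldl (fun d q => (d.erase q).insert q true)
      (PySem.Dict.empty : PySem.Dict Int Bool)).contains w
      = (PySem.Set.ofList queries.reverse).contains w := by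
    rw [PySem.Dict.contains_eq_decide_mem_keys, dictLoop_keys, PySem.Dict.keys_empty, kLoop_eq]
    simp
  rw [this]

-- ===== VERDICT (by name: the statement is the Claim_ definition above) =====
theorem simulationResult_spec : Claim_equal_simulationResult := by
  intro windows queries _
  unfold Spec_simulationResult
  exact simulationResult_eq windows queries
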